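-- pv_equiv track=rewrite | github.com/ADALIV/Algorithm | 프로그래머스/2/340212. ［PCCP 기출문제］ 2번 ／ 퍼즐 게임 챌린지/［PCCP 기출문제］ 2번 ／ 퍼즐 게임 챌린지.py | solution
-- ===== SOURCE A (Python) =====
-- def solution(diffs, times, limit):
--     n = len(diffs)
--
--     # 이진 탐색의 범위 설정 (lv는 최소 1부터 시작)
--     left, right = 1, max(diffs)
--
--     def calculate_spend(lv):
--         spend = 0
--         for i in range(n):
--             diff = diffs[i] - lv
--             time = times[i]
--             if diff > 0:
--                 spend += (time + times[i-1]) * diff + time if i > 0 else (time * diff + time)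
--             else:
--                 spend += time
--         return spend
--
--     # 이진 탐색
--     while left <= right:
--         mid = (left + right) // 2
--         spend = calculate_spend(mid)
--
--         if spend <= limit:
--             right = mid - 1  # limit 이하가 될 수 있는 더 작은 lv 값을 찾는다
--         else:
--             left = mid + 1   # spend가 limit을 초과하면 더 큰 lv 값을 찾아야 한다
--
--     return left
-- ===== SOURCE B (Python) =====
-- def solution(diffs, times, limit):
--     n = len(diffs)
--     total = 0
--     for i in range(n):
--         total += times[i]
--     coefs = [times[i] + (times[i - 1] if i > 0 else 0) for i in range(n)]
--     pairs = sorted(zip(diffs, coefs), key=lambda p: p[0])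
--     # suffix sums over the sorted pairs, accumulated from the largest diff:
--     # sufC[j] / sufCD[j] = sum of c resp. c*d over the j largest-diff pairs
--     sufC = [0]
--     sufCD = [0]
--     sc = 0
--     scd = 0
--     for d, c in reversed(pairs):
--         sc += c
--         scd += c * d
--         sufC.append(sc)
--         sufCD.append(scd)
--
--     def spend(lv):
--         # lo = number of sorted pairs with d <= lv (hand-rolled bisect_right)
--         lo, hi = 0, n
--         while lo < hi:
--             m = (lo + hi) // 2
--             if pairs[m][0] > lv:
--                 hi = m
--             else:
--                 lo = m + 1
--         return total + sufCD[n - lo] - lv * sufC[n - lo]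
--
--     left, right = 1, max(diffs)
--     while left <= right:
--         mid = (left + right) // 2
--         if spend(mid) <= limit:
--             right = mid - 1
--         else:
--             left = mid + 1
--     return left
-- ===== Notes on version B (the rewrite author's own statement) =====
-- stated objective: faster
-- what changed: A recomputes the challenge time with an O(n) scan for every probed level; B sorts the puzzles by difficulty once with their time coefficients, builds suffix sums of coef and coef*diff, and answers each spend query of the level binary search by an O(log n) partition search over the sorted difficulties.
-- outside the precondition, e.g. on solution([-5], [], 0): A returns 1, B raises IndexError
import Mathlib
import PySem

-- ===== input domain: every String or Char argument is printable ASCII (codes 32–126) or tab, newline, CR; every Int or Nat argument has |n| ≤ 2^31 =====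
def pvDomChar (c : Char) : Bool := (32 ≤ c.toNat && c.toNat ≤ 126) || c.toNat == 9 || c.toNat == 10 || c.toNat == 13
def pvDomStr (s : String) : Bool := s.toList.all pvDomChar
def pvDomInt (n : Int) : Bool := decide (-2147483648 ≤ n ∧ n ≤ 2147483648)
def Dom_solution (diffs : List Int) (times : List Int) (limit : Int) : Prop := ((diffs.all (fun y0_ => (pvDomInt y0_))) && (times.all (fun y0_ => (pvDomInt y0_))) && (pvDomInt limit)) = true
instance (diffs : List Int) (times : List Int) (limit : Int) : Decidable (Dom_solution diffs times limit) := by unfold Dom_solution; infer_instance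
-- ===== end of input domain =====

-- B replaces A's O(n) spend computation inside the binary search on the level by
-- sort-once + suffix sums + an O(log n) partition search; equivalence of return values is proved.

-- ===== PORT A =====
-- calculate_spend(lv)
def calcSpendA (diffs times : List Int) (n lv : Int) : Int :=
  (PySem.List.pyRange 0 n 1).foldl (fun spend i =>
    let diff := PySem.List.pyGetD diffs i 0 - lv
    let time := PySem.List.pyGetD times i 0
    if diff > 0 then
      spend + (if i > 0 then (time + PySem.List.pyGetD times (i - 1) 0) * diff + time
               else time * diff + time)
    else
      spend + time) 0

-- while left <= right: …
def loopA (diffs times : List Int) (n limit : Int) (left right : Int) : Int :=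
  if _h : left ≤ right then
    let mid := PySem.Int.floordiv (left + right) 2
    if calcSpendA diffs times n mid ≤ limit then
      loopA diffs times n limit left (mid - 1)
    else
      loopA diffs times n limit (mid + 1) right
  else left
termination_by (right + 1 - left).toNat
decreasing_by
  · have := PySem.Int.floordiv_two_mid_bounds _h
    omega
  · have := PySem.Int.floordiv_two_mid_bounds _h
    omega

def solution (diffs : List Int) (times : List Int) (limit : Int) : Int :=
  let n : Int := diffs.length
  loopA diffs times n limit 1 ((PySem.List.max? diffs (fun x => x)).getD 0)

-- ===== PORT B =====
-- coefs = [times[i] + (times[i-1] if i > 0 else 0) for i in range(n)]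
def coefsB (times : List Int) (n : Int) : List Int :=
  (PySem.List.pyRange 0 n 1).map (fun i =>
    PySem.List.pyGetD times i 0 + (if i > 0 then PySem.List.pyGetD times (i - 1) 0 else 0))

-- the 'for d, c in reversed(pairs)' loop: state (sc, scd, sufC, sufCD)
def buildSuf (qs : List (Int × Int)) : Int × Int × List Int × List Int :=
  qs.foldl (fun st q =>
      (st.1 + q.2, st.2.1 + q.2 * q.1,
       st.2.2.1 ++ [st.1 + q.2], st.2.2.2 ++ [st.2.1 + q.2 * q.1]))
    (0, 0, ([0] : List Int), ([0] : List Int))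

-- the 'while lo < hi' partition search inside spend(lv)
def bsLoop (pairs : List (Int × Int)) (lv lo hi : Int) : Int :=
  if _h : lo < hi then
    let m := PySem.Int.floordiv (lo + hi) 2
    if (PySem.List.pyGetD pairs m (0, 0)).1 > lv then
      bsLoop pairs lv lo m
    else
      bsLoop pairs lv (m + 1) hi
  else lo
termination_by (hi - lo).toNat
decreasing_by
  · have h2 := (PySem.Int.floordiv_lt_iff_lt_mul (a := lo + hi) (b := 2) (q := hi) (by omega)).mpr (by omega)
    omega
  · have h1 := (PySem.Int.le_floordiv_iff_mul_le (a := lo + hi) (b := 2) (q := lo) (by omega)).mpr (by omega)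
    omega

-- def spend(lv): …
def spendB (pairs : List (Int × Int)) (sufC sufCD : List Int) (total n lv : Int) : Int :=
  let lo := bsLoop pairs lv 0 n
  total + PySem.List.pyGetD sufCD (n - lo) 0 - lv * PySem.List.pyGetD sufC (n - lo) 0

-- while left <= right: …
def loopB (pairs : List (Int × Int)) (sufC sufCD : List Int) (total n limit : Int)
    (left right : Int) : Int :=
  if _h : left ≤ right then
    let mid := PySem.Int.floordiv (left + right) 2
    if spendB pairs sufC sufCD total n mid ≤ limit then
      loopB pairs sufC sufCD total n limit left (mid - 1)
    else
      loopB pairs sufC sufCD total n limit (mid + 1) right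
  else left
termination_by (right + 1 - left).toNat
decreasing_by
  · have := PySem.Int.floordiv_two_mid_bounds _h
    omega
  · have := PySem.Int.floordiv_two_mid_bounds _h
    omega

def solution_alt (diffs : List Int) (times : List Int) (limit : Int) : Int :=
  let n : Int := diffs.length
  let total := (PySem.List.pyRange 0 n 1).foldl (fun s i => s + PySem.List.pyGetD times i 0) 0
  let coefs := coefsB times n
  let pairs := PySem.List.sorted (diffs.zip coefs) (fun p => p.1)
  let st := buildSuf pairs.reverse
  loopB pairs st.2.2.1 st.2.2.2 total n limit 1 ((PySem.List.max? diffs (fun x => x)).getD 0)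

-- ===== PRECONDITION & SPEC =====
-- Pre_ excludes empty diffs (max() raises a ValueError in both programs) and times shorter than
-- diffs, where both programs index times out of range — except that A accidentally returns 1 when
-- additionally max(diffs) < 1, because its binary-search loop body never runs; B's precomputation
-- reads times[0..n-1] unconditionally and raises IndexError there.
def Pre_solution (diffs : List Int) (times : List Int) (limit : Int) : Prop :=
  diffs ≠ [] ∧ diffs.length ≤ times.length
instance (diffs : List Int) (times : List Int) (limit : Int) : Decidable (Pre_solution diffs times limit) := by unfold Pre_solution; infer_instance
def pvWitness_solution : List Int × List Int × Int := ([3, 1, 2], [4, 5, 6], 10)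

def Spec_solution (diffs : List Int) (times : List Int) (limit : Int) (out : Int) : Prop := out = solution_alt diffs times limit
instance (diffs : List Int) (times : List Int) (limit : Int) (out : Int) : Decidable (Spec_solution diffs times limit out) := by unfold Spec_solution; infer_instance

-- ===== CLAIM (what is proved, stated in full; the proofs are below) =====
def Claim_equal_solution : Prop := ∀ (diffs : List Int) (times : List Int) (limit : Int), Dom_solution diffs times limit → Pre_solution diffs times limit → Spec_solution diffs times limit (solution diffs times limit)

-- ===== LEMMAS AND PROOFS =====

-- the per-index summand of A's spend loop, read over Nat indices
def coefAt (times : List Int) (i : Nat) : Int :=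
  times.getD i 0 + (if 0 < i then times.getD (i - 1) 0 else 0)

def iteAt (diffs times : List Int) (lv : Int) (i : Nat) : Int :=
  if lv < diffs.getD i 0 then coefAt times i * (diffs.getD i 0 - lv) else 0

lemma calcSpendA_eq_sum (diffs times : List Int) (lv : Int) :
    calcSpendA diffs times (diffs.length : Int) lv
      = ((List.range diffs.length).map (fun i => times.getD i 0)).sum
        + ((List.range diffs.length).map (iteAt diffs times lv)).sum := by
  unfold calcSpendA
  rw [PySem.List.pyRange_zero_natCast, List.foldl_map]
  have hb : (fun (spend : Int) (k : Nat) =>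
      (fun (i : Int) =>
        let diff := PySem.List.pyGetD diffs i 0 - lv
        let time := PySem.List.pyGetD times i 0
        if diff > 0 then
          spend + (if i > 0 then (time + PySem.List.pyGetD times (i - 1) 0) * diff + time
                   else time * diff + time)
        else
          spend + time) ((k : Int)))
      = (fun (spend : Int) (k : Nat) => spend + (times.getD k 0 + iteAt diffs times lv k)) := by
    funext s k
    simp only [PySem.List.pyGetD_natCast, iteAt, coefAt]
    by_cases hk : 0 < k
    · have h1 : ((k : Int) > 0) := by exact_mod_cast hk
      have h2 : ((k : Int) - 1) = ((k - 1 : Nat) : Int) := by omega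
      rw [h2]
      simp only [PySem.List.pyGetD_natCast, if_pos h1, if_pos hk]
      split_ifs <;> first | (exfalso; omega) | ring
    · have h1 : ¬ ((k : Int) > 0) := by omega
      simp only [if_neg h1, if_neg hk]
      split_ifs <;> first | (exfalso; omega) | ring
  rw [hb, PySem.List.foldl_add, PySem.List.sum_map_add_int]
  simp

lemma totalB_eq_sum (times : List Int) (n : Nat) :
    (PySem.List.pyRange 0 (n : Int) 1).foldl (fun s i => s + PySem.List.pyGetD times i 0) 0
      = ((List.range n).map (fun i => times.getD i 0)).sum := by
  rw [PySem.List.pyRange_zero_natCast, List.foldl_map, PySem.List.foldl_add]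
  simp [PySem.List.pyGetD_natCast]

lemma coefsB_length (times : List Int) (n : Nat) : (coefsB times (n : Int)).length = n := by
  unfold coefsB; rw [PySem.List.pyRange_zero_natCast]; simp

lemma coefsB_getD (times : List Int) (n : Nat) (i : Nat) (h : i < n) :
    (coefsB times (n : Int)).getD i 0 = coefAt times i := by
  unfold coefsB
  rw [PySem.List.pyRange_zero_natCast, List.map_map]
  have hlen : i < ((List.range n).map ((fun i => PySem.List.pyGetD times i 0 + (if i > 0 then PySem.List.pyGetD times (i - 1) 0 else 0)) ∘ (fun k : Nat => (k : Int)))).length := by simp [h]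
  rw [List.getD_eq_getElem _ _ hlen, List.getElem_map, List.getElem_range]
  simp only [Function.comp, coefAt]
  by_cases hk : 0 < i
  · have h1 : ((i : Int) > 0) := by exact_mod_cast hk
    have h2 : ((i : Int) - 1) = ((i - 1 : Nat) : Int) := by omega
    rw [h2]
    simp [PySem.List.pyGetD_natCast, if_pos hk]
  · have h1 : ¬ ((i : Int) > 0) := by omega
    simp [PySem.List.pyGetD_natCast, if_neg hk]

-- sum over the index range = sum over the zipped pair list
lemma sum_zip_eq (diffs times : List Int) (lv : Int) :
    ((diffs.zip (coefsB times (diffs.length : Int))).map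
        (fun p => if lv < p.1 then p.2 * (p.1 - lv) else 0)).sum
      = ((List.range diffs.length).map (iteAt diffs times lv)).sum := by
  have hlc := coefsB_length times diffs.length
  have hz : (diffs.zip (coefsB times (diffs.length : Int))).map
        (fun p => if lv < p.1 then p.2 * (p.1 - lv) else 0)
      = (List.range diffs.length).map (iteAt diffs times lv) := by
    apply List.ext_getElem
    · simp [List.length_zip, hlc]
    · intro i h1 h2
      simp only [List.getElem_map, List.getElem_zip, List.getElem_range]
      have hi : i < diffs.length := by simp [List.length_zip, hlc] at h1; omega
      have hic : i < (coefsB times (diffs.length : Int)).length := by omega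
      rw [iteAt, ← List.getD_eq_getElem diffs 0 hi, ← List.getD_eq_getElem _ 0 hic,
        coefsB_getD times diffs.length i hi]
  rw [hz]

-- characterisation of the suffix-sum loop
lemma buildSuf_general (qs : List (Int × Int)) :
    ∀ (s0 sd0 : Int) (L1 L2 : List Int),
      qs.foldl (fun st q =>
          (st.1 + q.2, st.2.1 + q.2 * q.1,
           st.2.2.1 ++ [st.1 + q.2], st.2.2.2 ++ [st.2.1 + q.2 * q.1]))
        (s0, sd0, L1, L2)
      = (s0 + (qs.map Prod.snd).sum, sd0 + (qs.map (fun q => q.2 * q.1)).sum,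
         L1 ++ (List.range qs.length).map (fun j => s0 + ((qs.take (j + 1)).map Prod.snd).sum),
         L2 ++ (List.range qs.length).map (fun j => sd0 + ((qs.take (j + 1)).map (fun q => q.2 * q.1)).sum)) := by
  induction qs with
  | nil => simp
  | cons q qs ih =>
    intro s0 sd0 L1 L2
    rw [List.foldl_cons, ih]
    refine Prod.ext ?_ (Prod.ext ?_ (Prod.ext ?_ ?_)) <;>
      simp [List.range_succ_eq_map, List.map_map, Function.comp] <;>
      first
      | (exact fun a _ => trivial)
      | (intro a _; ring)
      | ring

lemma buildSuf_eq (qs : List (Int × Int)) :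
    buildSuf qs
      = ((qs.map Prod.snd).sum, (qs.map (fun q => q.2 * q.1)).sum,
         (List.range (qs.length + 1)).map (fun j => ((qs.take j).map Prod.snd).sum),
         (List.range (qs.length + 1)).map (fun j => ((qs.take j).map (fun q => q.2 * q.1)).sum)) := by
  rw [buildSuf, buildSuf_general]
  simp [List.range_succ_eq_map, List.map_map, Function.comp]

-- the partition search: on a list sorted by first component it returns the
-- count of elements with first component ≤ lv
lemma bsLoop_spec (ps : List (Int × Int)) (lv : Int)
    (hps : List.Pairwise (fun a b : Int × Int => a.1 ≤ b.1) ps) :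
    ∀ (fuel : Nat) (lo hi : Int), (hi - lo).toNat ≤ fuel →
      0 ≤ lo → lo ≤ hi → hi ≤ (ps.length : Int) →
      (∀ k : Nat, ∀ _h : k < ps.length, k < lo.toNat → ps[k].1 ≤ lv) →
      (∀ k : Nat, ∀ _h : k < ps.length, hi.toNat ≤ k → lv < ps[k].1) →
      lo ≤ bsLoop ps lv lo hi ∧ bsLoop ps lv lo hi ≤ hi ∧
      (∀ k : Nat, ∀ _h : k < ps.length, k < (bsLoop ps lv lo hi).toNat → ps[k].1 ≤ lv) ∧
      (∀ k : Nat, ∀ _h : k < ps.length, (bsLoop ps lv lo hi).toNat ≤ k → lv < ps[k].1) := by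
  have mono : ∀ p q : Nat, ∀ _hp : p < ps.length, ∀ _hq : q < ps.length, p ≤ q →
      ps[p].1 ≤ ps[q].1 := by
    intro p q hp hq hpq
    rcases Nat.eq_or_lt_of_le hpq with h | h
    · subst h; exact le_refl _
    · exact (List.pairwise_iff_getElem.mp hps) p q hp hq h
  intro fuel
  induction fuel with
  | zero =>
    intro lo hi hf h0 hlh hhl hlow hhigh
    rw [bsLoop, dif_neg (by omega : ¬ lo < hi)]
    exact ⟨le_refl _, hlh, hlow, fun k hk hlk => hhigh k hk (by omega)⟩
  | succ f ih =>
    intro lo hi hf h0 hlh hhl hlow hhigh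
    by_cases hlt : lo < hi
    · rw [bsLoop, dif_pos hlt]
      have hm1 : lo ≤ PySem.Int.floordiv (lo + hi) 2 :=
        (PySem.Int.le_floordiv_iff_mul_le (by omega)).mpr (by omega)
      have hm2 : PySem.Int.floordiv (lo + hi) 2 < hi :=
        (PySem.Int.floordiv_lt_iff_lt_mul (by omega)).mpr (by omega)
      set m := PySem.Int.floordiv (lo + hi) 2 with hmdef
      have hmlen : m.toNat < ps.length := by omega
      have hget : PySem.List.pyGetD ps m (0, 0) = ps[m.toNat] := by
        rw [PySem.List.pyGetD_of_nonneg _ _ (by omega)]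
        exact List.getD_eq_getElem _ _ hmlen
      simp only [hget]
      by_cases hc : ps[m.toNat].1 > lv
      · rw [if_pos hc]
        obtain ⟨a1, a2, a3, a4⟩ := ih lo m (by omega) h0 (by omega) (by omega) hlow
          (fun k hk hmk => lt_of_lt_of_le hc (mono m.toNat k hmlen hk (by omega)))
        exact ⟨a1, by omega, a3, a4⟩
      · rw [if_neg hc]
        obtain ⟨a1, a2, a3, a4⟩ := ih (m + 1) hi (by omega) (by omega) (by omega) hhl
          (fun k hk hkm => le_trans (mono k m.toNat hk hmlen (by omega)) (by omega))
          hhigh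
        exact ⟨by omega, a2, a3, a4⟩
    · rw [bsLoop, dif_neg hlt]
      exact ⟨le_refl _, hlh, hlow, fun k hk hlk => hhigh k hk (by omega)⟩

lemma sum_ite_partition (ps : List (Int × Int)) (lv : Int) (r : Nat) (hr : r ≤ ps.length)
    (hlow : ∀ k : Nat, ∀ _h : k < ps.length, k < r → ps[k].1 ≤ lv)
    (hhigh : ∀ k : Nat, ∀ _h : k < ps.length, r ≤ k → lv < ps[k].1) :
    (ps.map (fun p => if lv < p.1 then p.2 * (p.1 - lv) else 0)).sum
      = ((ps.drop r).map (fun q => q.2 * q.1)).sum - lv * ((ps.drop r).map Prod.snd).sum := by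
  conv_lhs => rw [← List.take_append_drop r ps]
  rw [List.map_append, List.sum_append]
  have h1 : (ps.take r).map (fun p => if lv < p.1 then p.2 * (p.1 - lv) else 0)
      = (ps.take r).map (fun _ => (0 : Int)) := by
    apply List.map_congr_left
    intro p hp
    obtain ⟨i, hi, hieq⟩ := List.mem_iff_getElem.mp hp
    have hilt : i < r := by simp at hi; omega
    have hips : i < ps.length := by omega
    have hpe : p = ps[i] := by rw [← hieq]; simp [List.getElem_take]
    rw [if_neg (by rw [hpe]; exact not_lt.mpr (hlow i hips hilt))]
  have h2 : (ps.drop r).map (fun p => if lv < p.1 then p.2 * (p.1 - lv) else 0)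
      = (ps.drop r).map (fun q => q.2 * q.1 + (-lv) * q.2) := by
    apply List.map_congr_left
    intro p hp
    obtain ⟨i, hi, hieq⟩ := List.mem_iff_getElem.mp hp
    have hips : r + i < ps.length := by simp at hi; omega
    have hpe : p = ps[r + i] := by rw [← hieq]; simp [List.getElem_drop]
    rw [if_pos (by rw [hpe]; exact hhigh (r + i) hips (by omega))]
    ring
  rw [h1, h2, PySem.List.sum_map_add_int, List.sum_map_mul_left]
  simp
  ring

-- the heart of the equivalence: A's spend equals B's spend at every level
lemma spend_eq (diffs times : List Int) (lv : Int) :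
    calcSpendA diffs times (diffs.length : Int) lv
      = spendB (PySem.List.sorted (diffs.zip (coefsB times (diffs.length : Int))) (fun p => p.1))
          (buildSuf (PySem.List.sorted (diffs.zip (coefsB times (diffs.length : Int))) (fun p => p.1)).reverse).2.2.1
          (buildSuf (PySem.List.sorted (diffs.zip (coefsB times (diffs.length : Int))) (fun p => p.1)).reverse).2.2.2
          ((PySem.List.pyRange 0 (diffs.length : Int) 1).foldl (fun s i => s + PySem.List.pyGetD times i 0) 0)
          (diffs.length : Int) lv := by
  have hlc := coefsB_length times diffs.length
  set N := diffs.length with hN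
  set zs := diffs.zip (coefsB times (N : Int)) with hzs
  set ps := PySem.List.sorted zs (fun p => p.1) with hpsdef
  have hperm : ps.Perm zs := PySem.List.sorted_perm zs (fun p => p.1) false
  have hlen : ps.length = N := by
    rw [hperm.length_eq, hzs, List.length_zip, hlc]; omega
  have hlenZ : (ps.length : Int) = (N : Int) := by omega
  have hpair := PySem.List.sorted_pairwise zs (fun p => p.1)
  rw [← hpsdef] at hpair
  simp only [spendB]
  obtain ⟨h0r, hrN, hlow, hhigh⟩ :=
    bsLoop_spec ps lv hpair N 0 (N : Int) (by omega) (by omega) (by omega) (by omega)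
      (fun k hk h => absurd h (by omega))
      (fun k hk h => absurd h (by omega))
  set r := bsLoop ps lv 0 (N : Int) with hrdef
  rw [calcSpendA_eq_sum, totalB_eq_sum times N]
  have hzsum : ((List.range N).map (iteAt diffs times lv)).sum
      = ((ps.drop r.toNat).map (fun q => q.2 * q.1)).sum
        - lv * ((ps.drop r.toNat).map Prod.snd).sum := by
    rw [← sum_zip_eq]
    have hpm : (zs.map (fun p => if lv < p.1 then p.2 * (p.1 - lv) else 0)).sum
        = (ps.map (fun p => if lv < p.1 then p.2 * (p.1 - lv) else 0)).sum :=
      ((hperm.map _).sum_eq).symm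
    rw [hpm, sum_ite_partition ps lv r.toNat (by omega) hlow hhigh]
  have hgetC : PySem.List.pyGetD (buildSuf ps.reverse).2.2.1 ((N : Int) - r) 0
      = ((ps.drop r.toNat).map Prod.snd).sum := by
    rw [buildSuf_eq]
    have hj : ((N : Int) - r) = ((N - r.toNat : Nat) : Int) := by omega
    rw [hj, PySem.List.pyGetD_natCast]
    have hjlen : (N - r.toNat : Nat)
        < ((List.range (ps.reverse.length + 1)).map (fun j => ((ps.reverse.take j).map Prod.snd).sum)).length := by
      simp [hlen]
    rw [List.getD_eq_getElem _ _ hjlen, List.getElem_map, List.getElem_range]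
    rw [List.take_reverse]
    have hrr : ps.length - (N - r.toNat) = r.toNat := by omega
    rw [hrr, List.map_reverse, List.sum_reverse]
  have hgetCD : PySem.List.pyGetD (buildSuf ps.reverse).2.2.2 ((N : Int) - r) 0
      = ((ps.drop r.toNat).map (fun q => q.2 * q.1)).sum := by
    rw [buildSuf_eq]
    have hj : ((N : Int) - r) = ((N - r.toNat : Nat) : Int) := by omega
    rw [hj, PySem.List.pyGetD_natCast]
    have hjlen : (N - r.toNat : Nat)
        < ((List.range (ps.reverse.length + 1)).map (fun j => ((ps.reverse.take j).map (fun q => q.2 * q.1)).sum)).length := by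
      simp [hlen]
    rw [List.getD_eq_getElem _ _ hjlen, List.getElem_map, List.getElem_range]
    rw [List.take_reverse]
    have hrr : ps.length - (N - r.toNat) = r.toNat := by omega
    rw [hrr, List.map_reverse, List.sum_reverse]
  rw [hzsum, hgetC, hgetCD]
  ring

lemma loop_eq (diffs times : List Int) (ps : List (Int × Int)) (sC sCD : List Int)
    (total n limit : Int)
    (hspend : ∀ lv, calcSpendA diffs times n lv = spendB ps sC sCD total n lv) :
    ∀ (fuel : Nat) (left right : Int), (right + 1 - left).toNat ≤ fuel →
      loopA diffs times n limit left right = loopB ps sC sCD total n limit left right := by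
  intro fuel
  induction fuel with
  | zero =>
    intro l r hf
    rw [loopA, loopB, dif_neg (by omega : ¬ l ≤ r), dif_neg (by omega : ¬ l ≤ r)]
  | succ f ih =>
    intro l r hf
    by_cases hlr : l ≤ r
    · rw [loopA, loopB, dif_pos hlr, dif_pos hlr]
      have hb := PySem.Int.floordiv_two_mid_bounds hlr
      simp only [← hspend]
      by_cases hc : calcSpendA diffs times n (PySem.Int.floordiv (l + r) 2) ≤ limit
      · rw [if_pos hc, if_pos hc]
        exact ih l (PySem.Int.floordiv (l + r) 2 - 1) (by omega)
      · rw [if_neg hc, if_neg hc]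
        exact ih (PySem.Int.floordiv (l + r) 2 + 1) r (by omega)
    · rw [loopA, loopB, dif_neg hlr, dif_neg hlr]

-- ===== VERDICT (by name: the statement is the Claim_ definition above) =====
theorem solution_spec : Claim_equal_solution := by
  intro diffs times limit _hdom _hpre
  unfold Spec_solution solution solution_alt
  exact loop_eq diffs times _ _ _ _ _ limit
    (fun lv => spend_eq diffs times lv)
    (((PySem.List.max? diffs (fun x => x)).getD 0) + 1 - 1).toNat 1 _ (le_refl _)
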